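-- pv_equiv track=rewrite | github.com/EMBL-PKU/BASALT | BASALT/S7_Contigs_retrieve_within_group_10262023.py | recal_PE
-- ===== SOURCE A (Python) =====
-- def recal_PE(bin_extract_contig, connection_total, bin_contig, bin):
--     new_bin_connections={}
--     for contigs in bin_extract_contig[bin].keys():
--         if contigs in connection_total.keys():
--             for connecting_contigs in connection_total[contigs].keys():
--                 if connecting_contigs not in bin_extract_contig[bin].keys() and connecting_contigs not in bin_contig[bin].keys():
--                     if bin not in new_bin_connections.keys():
--                         new_bin_connections[bin]=int(connection_total[contigs][connecting_contigs])
--                     else: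
--                         new_bin_connections[bin]+=int(connection_total[contigs][connecting_contigs])
--
--     for contigs in bin_contig[bin].keys():
--         if contigs in connection_total.keys():
--             for connecting_contigs in connection_total[contigs].keys():
--                 if connecting_contigs not in bin_extract_contig[bin].keys() and connecting_contigs not in bin_contig[bin].keys():
--                     if bin not in new_bin_connections.keys():
--                         new_bin_connections[bin]=int(connection_total[contigs][connecting_contigs])
--                     else:
--                         new_bin_connections[bin]+=int(connection_total[contigs][connecting_contigs])
--     return new_bin_connections
-- ===== SOURCE B (Python) =====
-- def recal_PE(bin_extract_contig, connection_total, bin_contig, bin):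
--     # Index-driven pass: walk the global connection table once; each source
--     # contig contributes with multiplicity = how many of the two bin dicts
--     # contain it (shared contigs count twice, as in the original).
--     inside = bin_extract_contig[bin]
--     inside2 = bin_contig[bin]
--     total = 0
--     hit = False
--     for contig, neighbors in connection_total.items():
--         mult = (contig in inside) + (contig in inside2)
--         if mult:
--             vals = [int(v) for cc, v in neighbors.items()
--                     if cc not in inside and cc not in inside2]
--             if vals:
--                 hit = True
--                 total += mult * sum(vals)
--     return {bin: total} if hit else {}
-- ===== Notes on version B (the rewrite author's own statement) =====
-- stated objective: alternative
-- what changed: Inverts the traversal: instead of A's two query-driven loops over the bin's contigs that look each one up in connection_total, B walks connection_total once and weights every source contig by its multiplicity (0/1/2) in the two bin dicts, accumulating a running total and a hit flag.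
import Mathlib
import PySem

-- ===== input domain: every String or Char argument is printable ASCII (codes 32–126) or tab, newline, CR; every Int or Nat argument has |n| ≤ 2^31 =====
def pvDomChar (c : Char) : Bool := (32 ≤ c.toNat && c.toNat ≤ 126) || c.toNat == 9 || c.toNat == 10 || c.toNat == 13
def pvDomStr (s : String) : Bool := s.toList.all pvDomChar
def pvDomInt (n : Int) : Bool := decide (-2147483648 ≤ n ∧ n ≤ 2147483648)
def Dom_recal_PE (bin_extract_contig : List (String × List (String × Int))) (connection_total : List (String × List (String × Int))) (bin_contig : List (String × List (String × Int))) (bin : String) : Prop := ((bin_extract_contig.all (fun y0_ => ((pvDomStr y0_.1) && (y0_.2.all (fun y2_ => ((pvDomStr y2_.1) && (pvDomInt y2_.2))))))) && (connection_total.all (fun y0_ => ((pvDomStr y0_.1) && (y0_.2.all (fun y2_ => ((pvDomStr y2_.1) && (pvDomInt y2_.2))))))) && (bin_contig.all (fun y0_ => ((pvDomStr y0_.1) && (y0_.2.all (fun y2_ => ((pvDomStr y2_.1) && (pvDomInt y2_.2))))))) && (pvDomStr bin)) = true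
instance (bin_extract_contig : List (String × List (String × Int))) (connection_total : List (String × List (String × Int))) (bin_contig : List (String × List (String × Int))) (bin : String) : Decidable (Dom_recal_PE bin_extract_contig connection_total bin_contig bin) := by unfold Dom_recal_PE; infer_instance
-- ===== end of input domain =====

-- B inverts the traversal: one pass over connection_total weighting each source contig by its
-- multiplicity (0/1/2) in the two bin dicts, instead of A's two query-driven dict-building loops.

-- ===== PORT A =====
def recal_PE (bin_extract_contig : List (String × List (String × Int))) (connection_total : List (String × List (String × Int))) (bin_contig : List (String × List (String × Int))) (bin : String) : List (String × Int) :=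
  let ctD := PySem.Dict.ofList connection_total
  let beBin := PySem.Dict.ofList ((PySem.Dict.ofList bin_extract_contig).getD bin [])
  let bcBin := PySem.Dict.ofList ((PySem.Dict.ofList bin_contig).getD bin [])
  -- A's two for-loops have the identical body; it is transcribed once as `step` and folded twice
  let step : PySem.Dict String Int → String → PySem.Dict String Int := fun nbc contigs =>
    if ctD.contains contigs then
      (PySem.Dict.ofList (ctD.getD contigs [])).keys.foldl (fun nbc cc =>
        if !beBin.contains cc && !bcBin.contains cc then
          if nbc.contains bin then
            nbc.insert bin (nbc.getD bin 0 + (PySem.Dict.ofList (ctD.getD contigs [])).getD cc 0)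
          else
            nbc.insert bin ((PySem.Dict.ofList (ctD.getD contigs [])).getD cc 0)
        else nbc) nbc
    else nbc
  let d1 := beBin.keys.foldl step PySem.Dict.empty
  let d2 := bcBin.keys.foldl step d1
  d2.items

-- ===== PORT B =====
def recal_PE_alt (bin_extract_contig : List (String × List (String × Int))) (connection_total : List (String × List (String × Int))) (bin_contig : List (String × List (String × Int))) (bin : String) : List (String × Int) :=
  let inside := PySem.Dict.ofList ((PySem.Dict.ofList bin_extract_contig).getD bin [])
  let inside2 := PySem.Dict.ofList ((PySem.Dict.ofList bin_contig).getD bin [])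
  let st := (PySem.Dict.ofList connection_total).items.foldl (fun (st : Int × Bool) p =>
    let mult : Int := (if inside.contains p.1 then 1 else 0) + (if inside2.contains p.1 then 1 else 0)
    if mult ≠ 0 then
      let vals := ((PySem.Dict.ofList p.2).items.filter
        (fun q => !inside.contains q.1 && !inside2.contains q.1)).map Prod.snd
      if vals.isEmpty then st else (st.1 + mult * vals.sum, true)
    else st) ((0 : Int), false)
  if st.2 then [(bin, st.1)] else []

-- ===== PRECONDITION & SPEC =====
-- Pre_ excludes exactly the inputs where the Python A raises KeyError: `bin` missing from
-- bin_extract_contig or from bin_contig (both are indexed unconditionally).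
def Pre_recal_PE (bin_extract_contig : List (String × List (String × Int))) (connection_total : List (String × List (String × Int))) (bin_contig : List (String × List (String × Int))) (bin : String) : Prop :=
  bin ∈ bin_extract_contig.map Prod.fst ∧ bin ∈ bin_contig.map Prod.fst
instance (bin_extract_contig : List (String × List (String × Int))) (connection_total : List (String × List (String × Int))) (bin_contig : List (String × List (String × Int))) (bin : String) : Decidable (Pre_recal_PE bin_extract_contig connection_total bin_contig bin) := by unfold Pre_recal_PE; infer_instance
def pvWitness_recal_PE : (List (String × List (String × Int))) × (List (String × List (String × Int))) × (List (String × List (String × Int))) × String :=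
  ([("b", [("c1", 1)])], [("c1", [("x", 3)])], [("b", [])], "b")
def Spec_recal_PE (bin_extract_contig : List (String × List (String × Int))) (connection_total : List (String × List (String × Int))) (bin_contig : List (String × List (String × Int))) (bin : String) (out : List (String × Int)) : Prop := out = recal_PE_alt bin_extract_contig connection_total bin_contig bin
instance (bin_extract_contig : List (String × List (String × Int))) (connection_total : List (String × List (String × Int))) (bin_contig : List (String × List (String × Int))) (bin : String) (out : List (String × Int)) : Decidable (Spec_recal_PE bin_extract_contig connection_total bin_contig bin out) := by unfold Spec_recal_PE; infer_instance

-- ===== CLAIM (what is proved, stated in full; the proofs are below) =====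
def Claim_equal_recal_PE : Prop := ∀ (bin_extract_contig : List (String × List (String × Int))) (connection_total : List (String × List (String × Int))) (bin_contig : List (String × List (String × Int))) (bin : String), Dom_recal_PE bin_extract_contig connection_total bin_contig bin → Pre_recal_PE bin_extract_contig connection_total bin_contig bin → Spec_recal_PE bin_extract_contig connection_total bin_contig bin (recal_PE bin_extract_contig connection_total bin_contig bin)

-- ===== LEMMAS AND PROOFS =====

def addVal (bin : String) (d : PySem.Dict String Int) (v : Int) : PySem.Dict String Int :=
  if d.contains bin then d.insert bin (d.getD bin 0 + v) else d.insert bin v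

lemma fold_if_filter {α δ : Type} (p : α → Bool) (v : α → Int) (step : δ → Int → δ) :
    ∀ (ks : List α) (d : δ),
      ks.foldl (fun d k => if p k then step d (v k) else d) d
        = ((ks.filter p).map v).foldl step d := by
  intro ks
  induction ks with
  | nil => intro d; rfl
  | cons h t ih =>
    intro d
    by_cases hp : p h = true <;> simp [hp, ih]

lemma foldl_flatMap' {α δ : Type} (f : α → List Int) (g : δ → Int → δ) :
    ∀ (l : List α) (d : δ), (l.flatMap f).foldl g d = l.foldl (fun a x => (f x).foldl g a) d := by
  intro l
  induction l with
  | nil => intro d; rfl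
  | cons h t ih => intro d; simp [List.foldl_append, ih]

lemma addVal_fold_single (bin : String) :
    ∀ (L : List Int) (s : Int),
      (L.foldl (addVal bin) (PySem.Dict.mk [(bin, s)])).items = [(bin, s + L.sum)] := by
  intro L
  induction L with
  | nil => intro s; simp
  | cons v t ih =>
    intro s
    have h1 : addVal bin (PySem.Dict.mk [(bin, s)]) v = PySem.Dict.mk [(bin, s + v)] := by
      simp [addVal, PySem.Dict.contains, PySem.Dict.getD, PySem.Dict.get?, PySem.Dict.insert]
    simp only [List.foldl_cons, h1, ih, List.sum_cons]
    ring_nf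

lemma addVal_fold_empty (bin : String) (L : List Int) :
    (L.foldl (addVal bin) PySem.Dict.empty).items = if L.isEmpty then [] else [(bin, L.sum)] := by
  cases L with
  | nil => rfl
  | cons v t =>
    have h1 : addVal bin PySem.Dict.empty v = PySem.Dict.mk [(bin, v)] := by
      simp [addVal, PySem.Dict.contains, PySem.Dict.empty, PySem.Dict.insert]
    simp [h1, addVal_fold_single]

lemma items_filter_map (D : PySem.Dict String Int) (q : String → Bool) (h : D.keys.Nodup) :
    (D.items.filter (fun p => q p.1)).map Prod.snd
      = (D.keys.filter q).map (fun k => D.getD k 0) := by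
  rw [PySem.Dict.items_eq_map_keys D h 0]
  rw [List.filter_map, List.map_map]
  rfl

def vals (ctD : PySem.Dict String (List (String × Int))) (q : String → Bool) (c : String) : List Int :=
  if ctD.contains c then
    ((PySem.Dict.ofList (ctD.getD c [])).items.filter (fun p => q p.1)).map Prod.snd
  else []

-- sum of f over a Nodup list = sum over ctD.keys of guarded f, when f vanishes off ctD
lemma sum_map_filter_zero {α : Type} (p : α → Bool) (f : α → Int)
    (h0 : ∀ c, p c = false → f c = 0) :
    ∀ (ks : List α), (ks.map f).sum = ((ks.filter p).map f).sum := by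
  intro ks
  induction ks with
  | nil => rfl
  | cons h t ih =>
    by_cases hp : p h = true
    · simp [hp, ih]
    · simp [List.filter_cons, hp, ih, h0 h (by simpa using hp)]

lemma sum_swap (ctD : PySem.Dict String (List (String × Int))) (f : String → Int)
    (hnk : ctD.keys.Nodup)
    (h0 : ∀ c, ctD.contains c = false → f c = 0)
    (ks : List String) (hk : ks.Nodup) :
    (ks.map f).sum = (ctD.keys.map (fun k => if k ∈ ks then f k else 0)).sum := by
  rw [sum_map_filter_zero (fun c => ctD.contains c) f h0 ks]
  rw [sum_map_filter_zero (fun k => decide (k ∈ ks)) (fun k => if k ∈ ks then f k else 0)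
    (by intro c hc; simp at hc; simp [hc]) ctD.keys]
  have hperm : (ks.filter (fun c => ctD.contains c)).Perm
      (ctD.keys.filter (fun k => decide (k ∈ ks))) := by
    rw [List.perm_ext_iff_of_nodup (hk.filter _) (hnk.filter _)]
    intro a
    simp [PySem.Dict.contains_iff_mem_keys, and_comm]
  calc ((ks.filter (fun c => ctD.contains c)).map f).sum
      = ((ctD.keys.filter (fun k => decide (k ∈ ks))).map f).sum := (hperm.map f).sum_eq
    _ = ((ctD.keys.filter (fun k => decide (k ∈ ks))).map (fun k => if k ∈ ks then f k else 0)).sum := by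
        apply congrArg
        apply List.map_congr_left
        intro a ha
        have := (List.mem_filter.mp ha).2
        simp at this
        simp [this]

-- characterisation of B's accumulator fold
lemma foldB_char (inside inside2 : PySem.Dict String Int) :
    ∀ (l : List (String × List (String × Int))) (t : Int) (h : Bool),
      l.foldl (fun (st : Int × Bool) p =>
        let mult : Int := (if inside.contains p.1 then 1 else 0) + (if inside2.contains p.1 then 1 else 0)
        if mult ≠ 0 then
          let vals := ((PySem.Dict.ofList p.2).items.filter
            (fun q => !inside.contains q.1 && !inside2.contains q.1)).map Prod.snd
          if vals.isEmpty then st else (st.1 + mult * vals.sum, true)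
        else st) (t, h)
      = (t + (l.map (fun p =>
            ((if inside.contains p.1 then (1:Int) else 0) + (if inside2.contains p.1 then 1 else 0)) *
            (((PySem.Dict.ofList p.2).items.filter
              (fun q => !inside.contains q.1 && !inside2.contains q.1)).map Prod.snd).sum)).sum,
         h || l.any (fun p =>
            decide (((if inside.contains p.1 then (1:Int) else 0) + (if inside2.contains p.1 then 1 else 0)) ≠ 0)
            && !(((PySem.Dict.ofList p.2).items.filter
              (fun q => !inside.contains q.1 && !inside2.contains q.1)).map Prod.snd).isEmpty)) := by
  intro l
  induction l with
  | nil => intro t h; simp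
  | cons p rest ih =>
    intro t h
    simp only [List.foldl_cons, List.map_cons, List.sum_cons, List.any_cons]
    set m : Int := (if inside.contains p.1 then (1:Int) else 0) + (if inside2.contains p.1 then 1 else 0) with hm
    set V : List Int := ((PySem.Dict.ofList p.2).items.filter
      (fun q => !inside.contains q.1 && !inside2.contains q.1)).map Prod.snd with hV
    by_cases hmz : m ≠ 0
    · by_cases hVe : V.isEmpty = true
      · have hVnil : V = [] := by simpa [List.isEmpty_iff] using hVe
        simp only [hmz, if_pos, if_true, hVe, if_pos]
        rw [ih]
        simp [hVnil, hmz]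
      · simp only [hmz, if_pos, if_true, hVe, if_neg]
        rw [ih]
        simp only [hVe, Bool.not_false, hmz, decide_true, Bool.true_and, Bool.or_true,
          Bool.true_or]
        simp only [Prod.mk.injEq]
        refine ⟨?_, ?_⟩
        · rw [if_pos hmz, if_neg Bool.false_ne_true]; ring
        · rw [if_pos hmz, if_neg Bool.false_ne_true]; simp; exact Or.inr (Or.inl hmz)
    · push_neg at hmz
      simp only [hmz, ne_eq, not_true_eq_false, if_false]
      rw [ih]
      simp [hmz]

lemma flip_if {α : Type} (b : Bool) (x : List α) :
    (if (!b) = true then [] else x) = if b = true then x else [] := by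
  cases b <;> simp

lemma any_congr_mem {α : Type} (l : List α) (p p' : α → Bool) (h : ∀ x ∈ l, p x = p' x) :
    l.any p = l.any p' := by
  induction l with
  | nil => rfl
  | cons a t ih =>
    simp only [List.any_cons, h a (List.mem_cons_self), ih (fun x hx => h x (List.mem_cons_of_mem a hx))]

lemma mult_ne_zero_iff (a b : Bool) :
    ((if a then (1:Int) else 0) + (if b then 1 else 0)) ≠ 0 ↔ (a = true ∨ b = true) := by
  cases a <;> cases b <;> simp

lemma core2 (ctD : PySem.Dict String (List (String × Int))) (beBin bcBin : PySem.Dict String Int)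
    (bin : String) (hct : ctD.keys.Nodup) (hbe : beBin.keys.Nodup) (hbc : bcBin.keys.Nodup) :
    (bcBin.keys.foldl
      (fun nbc contigs =>
        if ctD.contains contigs then
          (PySem.Dict.ofList (ctD.getD contigs [])).keys.foldl (fun nbc cc =>
            if !beBin.contains cc && !bcBin.contains cc then
              if nbc.contains bin then
                nbc.insert bin (nbc.getD bin 0 + (PySem.Dict.ofList (ctD.getD contigs [])).getD cc 0)
              else
                nbc.insert bin ((PySem.Dict.ofList (ctD.getD contigs [])).getD cc 0)
            else nbc) nbc
        else nbc)
      (beBin.keys.foldl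
        (fun nbc contigs =>
          if ctD.contains contigs then
            (PySem.Dict.ofList (ctD.getD contigs [])).keys.foldl (fun nbc cc =>
              if !beBin.contains cc && !bcBin.contains cc then
                if nbc.contains bin then
                  nbc.insert bin (nbc.getD bin 0 + (PySem.Dict.ofList (ctD.getD contigs [])).getD cc 0)
                else
                  nbc.insert bin ((PySem.Dict.ofList (ctD.getD contigs [])).getD cc 0)
              else nbc) nbc
          else nbc)
        PySem.Dict.empty)).items
    = (let st := ctD.items.foldl (fun (st : Int × Bool) p =>
        let mult : Int := (if beBin.contains p.1 then 1 else 0) + (if bcBin.contains p.1 then 1 else 0)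
        if mult ≠ 0 then
          let vls := ((PySem.Dict.ofList p.2).items.filter
            (fun q => !beBin.contains q.1 && !bcBin.contains q.1)).map Prod.snd
          if vls.isEmpty then st else (st.1 + mult * vls.sum, true)
        else st) ((0 : Int), false)
      if st.2 then [(bin, st.1)] else []) := by
  set q : String → Bool := fun k => !beBin.contains k && !bcBin.contains k with hq
  -- ===== A side: collapse the two dict-building folds into `if L.isEmpty then [] else [(bin, L.sum)]`
  rw [← List.foldl_append]
  have hstep : (fun (nbc : PySem.Dict String Int) contigs =>
        if ctD.contains contigs then
          (PySem.Dict.ofList (ctD.getD contigs [])).keys.foldl (fun nbc cc =>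
            if !beBin.contains cc && !bcBin.contains cc then
              if nbc.contains bin then
                nbc.insert bin (nbc.getD bin 0 + (PySem.Dict.ofList (ctD.getD contigs [])).getD cc 0)
              else
                nbc.insert bin ((PySem.Dict.ofList (ctD.getD contigs [])).getD cc 0)
            else nbc) nbc
        else nbc)
      = fun nbc c => (vals ctD q c).foldl (addVal bin) nbc := by
    funext nbc c
    by_cases hc : ctD.contains c = true
    · simp only [hc, if_true, vals, hq]
      rw [show (fun (nbc : PySem.Dict String Int) cc =>
            if !beBin.contains cc && !bcBin.contains cc then
              if nbc.contains bin then
                nbc.insert bin (nbc.getD bin 0 + (PySem.Dict.ofList (ctD.getD c [])).getD cc 0)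
              else
                nbc.insert bin ((PySem.Dict.ofList (ctD.getD c [])).getD cc 0)
            else nbc)
          = (fun (nbc : PySem.Dict String Int) cc =>
              if !beBin.contains cc && !bcBin.contains cc then
                addVal bin nbc ((PySem.Dict.ofList (ctD.getD c [])).getD cc 0)
              else nbc) from rfl]
      rw [fold_if_filter (fun cc => !beBin.contains cc && !bcBin.contains cc)
            (fun cc => (PySem.Dict.ofList (ctD.getD c [])).getD cc 0) (addVal bin)]
      rw [items_filter_map (PySem.Dict.ofList (ctD.getD c []))
            (fun k => !beBin.contains k && !bcBin.contains k) (PySem.Dict.nodup_keys_ofList _)]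
    · simp only [hc, vals, Bool.not_eq_true] at *
      simp
  rw [hstep, ← foldl_flatMap', addVal_fold_empty]
  -- ===== B side: the accumulator fold is a weighted sum plus an any-flag over ctD.keys
  rw [foldB_char beBin bcBin ctD.items 0 false]
  simp only [zero_add, Bool.false_or]
  rw [PySem.Dict.items_eq_map_keys ctD hct []]
  rw [List.map_map, List.any_map]
  have hfun : ((fun p : String × List (String × Int) =>
        ((if beBin.contains p.1 then (1:Int) else 0) + (if bcBin.contains p.1 then 1 else 0)) *
        (((PySem.Dict.ofList p.2).items.filter
          (fun q => !beBin.contains q.1 && !bcBin.contains q.1)).map Prod.snd).sum)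
      ∘ (fun k => (k, ctD.getD k []))) =
      fun k => ((if beBin.contains k then (1:Int) else 0) + (if bcBin.contains k then 1 else 0)) *
        (((PySem.Dict.ofList (ctD.getD k [])).items.filter (fun p => q p.1)).map Prod.snd).sum := rfl
  have hfun2 : ((fun p : String × List (String × Int) =>
        decide (((if beBin.contains p.1 then (1:Int) else 0) + (if bcBin.contains p.1 then 1 else 0)) ≠ 0)
        && !(((PySem.Dict.ofList p.2).items.filter
          (fun q => !beBin.contains q.1 && !bcBin.contains q.1)).map Prod.snd).isEmpty)
      ∘ (fun k => (k, ctD.getD k []))) =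
      fun k => decide (((if beBin.contains k then (1:Int) else 0) + (if bcBin.contains k then 1 else 0)) ≠ 0)
        && !(((PySem.Dict.ofList (ctD.getD k [])).items.filter (fun p => q p.1)).map Prod.snd).isEmpty := rfl
  rw [hfun, hfun2]
  -- rewrite per-key values through `vals` (contains is true on ctD.keys)
  have hvals : ∀ k ∈ ctD.keys,
      ((PySem.Dict.ofList (ctD.getD k [])).items.filter (fun p => q p.1)).map Prod.snd
        = vals ctD q k := by
    intro k hk
    have : ctD.contains k = true := (PySem.Dict.contains_iff_mem_keys _ _).mpr hk
    simp [vals, this]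
  -- the weighted sum equals L.sum
  have hsum : ((beBin.keys ++ bcBin.keys).flatMap (vals ctD q)).sum
      = (ctD.keys.map (fun k =>
          ((if beBin.contains k then (1:Int) else 0) + (if bcBin.contains k then 1 else 0)) *
          (vals ctD q k).sum)).sum := by
    have h0 : ∀ c, ctD.contains c = false → (vals ctD q c).sum = 0 := by
      intro c hc; simp [vals, hc]
    have hfm : ∀ ks : List String, (ks.flatMap (vals ctD q)).sum
        = (ks.map (fun c => (vals ctD q c).sum)).sum := by
      intro ks; induction ks with
      | nil => rfl
      | cons a t ih => simp [List.flatMap_cons, ih]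
    rw [hfm, List.map_append, List.sum_append,
        sum_swap ctD _ hct h0 beBin.keys hbe, sum_swap ctD _ hct h0 bcBin.keys hbc,
        ← List.sum_map_add]
    apply congrArg
    apply List.map_congr_left
    intro k _
    rw [PySem.Dict.contains_eq_decide_mem_keys, PySem.Dict.contains_eq_decide_mem_keys]
    by_cases h1 : k ∈ beBin.keys <;> by_cases h2 : k ∈ bcBin.keys <;> simp [h1, h2] <;> ring
  -- emptiness of L matches the any-flag
  have hemp : ((beBin.keys ++ bcBin.keys).flatMap (vals ctD q)).isEmpty
      = !(ctD.keys.any (fun k =>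
          decide (((if beBin.contains k then (1:Int) else 0) + (if bcBin.contains k then 1 else 0)) ≠ 0)
          && !(vals ctD q k).isEmpty)) := by
    rcases ha : ctD.keys.any (fun k =>
        decide (((if beBin.contains k then (1:Int) else 0) + (if bcBin.contains k then 1 else 0)) ≠ 0)
        && !(vals ctD q k).isEmpty) with _ | _
    · -- no key fires: every vals over the chain is empty
      simp only [Bool.not_false]
      rw [List.isEmpty_iff, List.flatMap_eq_nil_iff]
      intro c hc
      by_cases hcc : ctD.contains c = true
      · have hmem : c ∈ ctD.keys := (PySem.Dict.contains_iff_mem_keys _ _).mp hcc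
        have := (List.any_eq_false.mp ha) c hmem
        simp only [Bool.and_eq_true, decide_eq_true_eq, Bool.not_eq_true', not_and] at this
        have hm : ((if beBin.contains c then (1:Int) else 0) + (if bcBin.contains c then 1 else 0)) ≠ 0 := by
          rw [mult_ne_zero_iff]
          rcases List.mem_append.mp hc with h | h
          · exact Or.inl ((PySem.Dict.contains_iff_mem_keys _ _).mpr h)
          · exact Or.inr ((PySem.Dict.contains_iff_mem_keys _ _).mpr h)
        have := this hm
        simpa [List.isEmpty_iff] using this
      · simp [vals, hcc]
    · -- some key fires: L is nonempty
      simp only [Bool.not_true]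
      rw [List.isEmpty_eq_false_iff, Ne, List.flatMap_eq_nil_iff]
      intro hall
      rcases List.any_eq_true.mp ha with ⟨k, hk, hkprop⟩
      simp only [Bool.and_eq_true, decide_eq_true_eq, Bool.not_eq_true', List.isEmpty_eq_false_iff] at hkprop
      obtain ⟨hm, hne⟩ := hkprop
      rcases (mult_ne_zero_iff _ _).mp hm with h | h
      · exact hne (hall k (List.mem_append.mpr (Or.inl ((PySem.Dict.contains_iff_mem_keys _ _).mp h))))
      · exact hne (hall k (List.mem_append.mpr (Or.inr ((PySem.Dict.contains_iff_mem_keys _ _).mp h))))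
  -- assemble
  have hmc : (ctD.keys.map (fun k =>
        ((if beBin.contains k then (1:Int) else 0) + (if bcBin.contains k then 1 else 0)) *
        (((PySem.Dict.ofList (ctD.getD k [])).items.filter (fun p => q p.1)).map Prod.snd).sum))
      = ctD.keys.map (fun k =>
        ((if beBin.contains k then (1:Int) else 0) + (if bcBin.contains k then 1 else 0)) *
        (vals ctD q k).sum) := by
    apply List.map_congr_left; intro k hk; rw [hvals k hk]
  have hac : (ctD.keys.any (fun k =>
        decide (((if beBin.contains k then (1:Int) else 0) + (if bcBin.contains k then 1 else 0)) ≠ 0)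
        && !(((PySem.Dict.ofList (ctD.getD k [])).items.filter (fun p => q p.1)).map Prod.snd).isEmpty))
      = ctD.keys.any (fun k =>
        decide (((if beBin.contains k then (1:Int) else 0) + (if bcBin.contains k then 1 else 0)) ≠ 0)
        && !(vals ctD q k).isEmpty) := by
    exact any_congr_mem _ _ _ (fun k hk => by rw [hvals k hk])
  rw [hmc, hac, ← hsum, hemp]
  exact flip_if _ _

-- ===== VERDICT (by name: the statement is the Claim_ definition above) =====
theorem recal_PE_spec : Claim_equal_recal_PE := by
  intro bin_extract_contig connection_total bin_contig bin _ _
  show recal_PE bin_extract_contig connection_total bin_contig bin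
      = recal_PE_alt bin_extract_contig connection_total bin_contig bin
  exact core2 (PySem.Dict.ofList connection_total)
    (PySem.Dict.ofList ((PySem.Dict.ofList bin_extract_contig).getD bin []))
    (PySem.Dict.ofList ((PySem.Dict.ofList bin_contig).getD bin [])) bin
    (PySem.Dict.nodup_keys_ofList _) (PySem.Dict.nodup_keys_ofList _) (PySem.Dict.nodup_keys_ofList _)
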